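-- pv_equiv track=rewrite | github.com/donnenbr/inv-mgmt | inv-data/mongodb/mk_vials.py | gen_position
-- ===== SOURCE A (Python) =====
-- NUMBER_ROWS = NUMBER_COLUMNS = 10
--
-- NUMBER_ROWS = NUMBER_COLUMNS = 10
--
-- def gen_position(racks):
-- 	positions = []
-- 	for row in range(NUMBER_ROWS):
-- 		for col in range(NUMBER_COLUMNS):
-- 			positions.append(f"{row+1},{col+1}")
-- 	for rack in racks:
-- 		for pos in positions:
-- 			yield (rack,pos)
-- ===== SOURCE B (Python) =====
-- NUMBER_ROWS = NUMBER_COLUMNS = 10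
--
-- def gen_position(racks):
--     # Single flat loop: decode rack index and grid cell from one counter by
--     # index arithmetic (k // 100 picks the rack, divmod(k % 100, 10) the cell).
--     per_rack = NUMBER_ROWS * NUMBER_COLUMNS
--     for k in range(len(racks) * per_rack):
--         rack = racks[k // per_rack]
--         row, col = divmod(k % per_rack, NUMBER_COLUMNS)
--         yield (rack, f"{row + 1},{col + 1}")
-- ===== Notes on version B (the rewrite author's own statement) =====
-- stated objective: alternative
-- what changed: Replaced A's two-stage build-a-100-entry-positions-table-then-nested-iterate with a single flat loop over one counter k in range(len(racks)*100), decoding the rack by k//100 and the grid cell by divmod(k%100,10); no table and no nested loops are maintained.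
import Mathlib
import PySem

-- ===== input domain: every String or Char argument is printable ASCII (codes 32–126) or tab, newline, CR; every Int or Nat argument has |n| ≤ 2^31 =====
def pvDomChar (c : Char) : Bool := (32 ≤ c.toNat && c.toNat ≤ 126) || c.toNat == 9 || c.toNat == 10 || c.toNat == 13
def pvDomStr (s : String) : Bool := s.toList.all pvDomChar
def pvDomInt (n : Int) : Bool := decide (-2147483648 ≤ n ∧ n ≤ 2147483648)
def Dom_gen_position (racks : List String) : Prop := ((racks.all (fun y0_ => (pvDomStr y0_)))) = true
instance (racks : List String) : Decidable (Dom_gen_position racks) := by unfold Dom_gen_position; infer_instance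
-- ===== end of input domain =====

-- B replaces A's build-a-table-then-nested-iterate with one flat loop over a single
-- counter, decoding rack and grid cell by index arithmetic (objective: alternative).

-- ===== PORT A =====
-- A first builds the 100-entry positions table, then yields rack × positions.
def gen_position (racks : List String) : List (String × String) :=
  let positions : List String :=
    (PySem.List.pyRange 0 10 1).foldl (fun acc row =>
      (PySem.List.pyRange 0 10 1).foldl (fun acc2 col =>
        acc2 ++ [PySem.Int.toStr (row + 1) ++ "," ++ PySem.Int.toStr (col + 1)]) acc) []
  racks.foldl (fun acc rack =>
    positions.foldl (fun acc2 pos => acc2 ++ [(rack, pos)]) acc) []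

-- ===== PORT B =====
-- one flat loop over k in range(len(racks)*100); rack = racks[k//100] (index always
-- in range, so the total pyGetD is exact here), cell = divmod(k%100, 10)
def gen_position_alt (racks : List String) : List (String × String) :=
  (PySem.List.pyRange 0 ((racks.length : Int) * 100) 1).map (fun k =>
    let rack := PySem.List.pyGetD racks (PySem.Int.floordiv k 100) ""
    let row := PySem.Int.floordiv (PySem.Int.mod k 100) 10
    let col := PySem.Int.mod (PySem.Int.mod k 100) 10
    (rack, PySem.Int.toStr (row + 1) ++ "," ++ PySem.Int.toStr (col + 1)))

-- ===== PRECONDITION & SPEC =====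
def Spec_gen_position (racks : List String) (out : List (String × String)) : Prop := out = gen_position_alt racks
instance (racks : List String) (out : List (String × String)) : Decidable (Spec_gen_position racks out) := by unfold Spec_gen_position; infer_instance

-- ===== CLAIM (what is proved, stated in full; the proofs are below) =====
def Claim_equal_gen_position : Prop := ∀ (racks : List String), Dom_gen_position racks → Spec_gen_position racks (gen_position racks)

-- ===== LEMMAS AND PROOFS =====

-- the position string of cell index m (0 ≤ m < 100)
def posOf (m : Int) : String :=
  PySem.Int.toStr (PySem.Int.floordiv m 10 + 1) ++ "," ++ PySem.Int.toStr (PySem.Int.mod m 10 + 1)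

lemma B_flatMap (racks : List String) :
    gen_position_alt racks
      = racks.flatMap (fun rack =>
          (PySem.List.pyRange 0 100 1).map (fun k => (rack, posOf k))) := by
  induction racks using List.reverseRecOn with
  | nil => simp [gen_position_alt, PySem.List.pyRange_one_eq_nil]
  | append_singleton rs r ih =>
    have hlen : ((rs ++ [r]).length : Int) * 100 = (rs.length : Int) * 100 + 100 := by
      simp; ring
    rw [gen_position_alt, hlen,
        PySem.List.pyRange_one_append 0 ((rs.length : Int) * 100) ((rs.length : Int) * 100 + 100)
          (by positivity) (by omega), List.map_append, List.flatMap_append]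
    congr 1
    · -- first block: indices below rs.length*100 pick from rs
      rw [← ih, gen_position_alt]
      refine List.map_congr_left ?_
      intro k hk
      rw [PySem.List.mem_pyRange_one] at hk
      have hd : PySem.Int.floordiv k 100 = k / 100 := PySem.Int.floordiv_eq_ediv_of_pos (by omega)
      have h0 : 0 ≤ k / 100 := by omega
      have h1 : k / 100 < (rs.length : Int) := by omega
      simp only [hd]
      rw [PySem.List.pyGetD_eq_getElem (rs ++ [r]) "" h0 (by simp; omega),
          PySem.List.pyGetD_eq_getElem rs "" h0 h1,
          List.getElem_append_left (by omega)]
    · -- last block: indices rs.length*100 + j pick r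
      rw [PySem.List.pyRange_one, show ((rs.length : Int) * 100 + 100 - (rs.length : Int) * 100).toNat = 100 by omega]
      have h2 : PySem.List.pyRange 0 100 = (List.range 100).map (fun k : Nat => ((k : Int))) := by
        rw [PySem.List.pyRange_one]; simp
      simp only [List.flatMap_cons, List.flatMap_nil, List.append_nil, h2,
        List.map_map, Function.comp_def]
      refine List.map_congr_left ?_
      intro j hj
      rw [List.mem_range] at hj
      have hd : PySem.Int.floordiv ((rs.length : Int) * 100 + (j : Int)) 100 = (rs.length : Int) :=
        by rw [PySem.Int.floordiv_eq_ediv_of_pos (by omega)]; omega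
      have hm : PySem.Int.mod ((rs.length : Int) * 100 + (j : Int)) 100 = (j : Int) := by
        rw [PySem.Int.mod_eq_emod_of_pos (by omega)]; omega
      simp only [hd, hm, PySem.List.pyGetD_natCast]
      rw [List.getD_append_right rs [r] "" rs.length (le_refl _)]
      simp [posOf]

-- A's concrete positions table is the flat-index table
set_option maxRecDepth 40000 in
lemma positions_eq :
    (PySem.List.pyRange 0 10 1).foldl (fun acc row =>
      (PySem.List.pyRange 0 10 1).foldl (fun acc2 col =>
        acc2 ++ [PySem.Int.toStr (row + 1) ++ "," ++ PySem.Int.toStr (col + 1)]) acc) []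
      = (PySem.List.pyRange 0 100 1).map posOf := by decide

-- ===== VERDICT (by name: the statement is the Claim_ definition above) =====
theorem gen_position_spec : Claim_equal_gen_position := by
  intro racks _
  unfold Spec_gen_position
  rw [B_flatMap, gen_position]
  simp only [positions_eq]
  simp only [PySem.List.foldl_append_singleton_eq_map, PySem.List.foldl_append_eq_flatMap,
    List.nil_append, List.map_map, Function.comp_def]
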